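-- pv_equiv track=rewrite | github.com/baaratik93/LearnPython | Exercice 3.py | EspaceInutile
-- ===== SOURCE A (Python) =====
-- def EspaceInutile(phrase):
--     phrase1 = ""
--     i=0
--     x=0
--     taille = len(phrase)
--     for i in range(0, taille):
--         if i==0 and phrase[i] == ' ':
--             continue
--         if i+1 == taille:
--             phrase1 = phrase1 + phrase[i]
--             continue
--         if phrase[i] == phrase[i + 1] == " ":
--             x = x + 1
--             if x > 2:
--                 continue
--         else:
--             phrase1 = phrase1 + phrase[i]
--     return phrase1
-- ===== SOURCE B (Python) =====
-- def EspaceInutile(phrase):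
--     # drop one leading space, then keep a space only if the previous kept char was not a space
--     if phrase.startswith(' '):
--         phrase = phrase[1:]
--     out = []
--     prev_space = False
--     for c in phrase:
--         if c == ' ' and prev_space:
--             continue
--         out.append(c)
--         prev_space = (c == ' ')
--     return ''.join(out)
-- ===== Notes on version B (the rewrite author's own statement) =====
-- stated objective: simpler
-- what changed: A's indexed loop with a one-char lookahead, a vestigial counter x and special cases for index 0 and the last index is replaced by stripping one leading space up front and a single forward pass with a previous-was-space flag (keep the first space of each run instead of the last). This removes quadratic string concatenation.
import Mathlib
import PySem

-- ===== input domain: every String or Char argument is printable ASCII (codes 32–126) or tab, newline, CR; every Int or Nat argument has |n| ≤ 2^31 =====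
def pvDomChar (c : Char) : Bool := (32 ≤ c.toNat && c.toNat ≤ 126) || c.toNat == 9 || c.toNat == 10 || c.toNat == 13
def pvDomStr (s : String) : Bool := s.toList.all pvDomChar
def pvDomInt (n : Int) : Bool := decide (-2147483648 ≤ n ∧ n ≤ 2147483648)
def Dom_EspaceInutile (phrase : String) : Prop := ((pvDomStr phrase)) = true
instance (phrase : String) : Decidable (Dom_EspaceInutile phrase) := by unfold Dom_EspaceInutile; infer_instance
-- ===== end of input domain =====

-- B replaces A's indexed lookahead loop (with its vestigial counter and index-0/last-index
-- special cases) by one leading-space strip plus a single previous-was-space-flag pass (simpler).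

-- ===== PORT A =====
-- Python A: indexed for-loop over range(0, taille) with state (phrase1, x); every
-- index i accessed satisfies i < taille (and i+1 < taille where cs[i+1] is read),
-- so getD is exact for phrase[i].  The inner 'if x > 2: continue' changes nothing
-- besides what the fall-through already does (no append either way), so both of its
-- outcomes are the same state (phrase1, x+1).
def EspaceInutileGo (cs : List Char) (taille : Nat) (i : Nat)
    (phrase1 : List Char) (x : Nat) : List Char :=
  if _h : i < taille then
    if i = 0 ∧ cs.getD i ' ' = ' ' then
      EspaceInutileGo cs taille (i + 1) phrase1 x
    else if i + 1 = taille then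
      EspaceInutileGo cs taille (i + 1) (phrase1 ++ [cs.getD i ' ']) x
    else if cs.getD i ' ' = ' ' ∧ cs.getD (i + 1) ' ' = ' ' then
      EspaceInutileGo cs taille (i + 1) phrase1 (x + 1)
    else
      EspaceInutileGo cs taille (i + 1) (phrase1 ++ [cs.getD i ' ']) x
  else phrase1
termination_by taille - i

def EspaceInutile (phrase : String) : String :=
  let cs := phrase.toList
  String.mk (EspaceInutileGo cs cs.length 0 [] 0)

-- ===== PORT B =====
-- Python B: phrase.startswith(' ') → drop the first char; then a fold carrying
-- (out, prev_space), skipping a space whose predecessor was kept as a space.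
def EspaceInutile_alt (phrase : String) : String :=
  let cs0 := phrase.toList
  let cs := if cs0.head? = some ' ' then cs0.tail else cs0
  let res := cs.foldl
    (fun (st : List Char × Bool) c =>
      if c = ' ' ∧ st.2 = true then st
      else (st.1 ++ [c], decide (c = ' ')))
    ([], false)
  String.mk res.1

-- ===== PRECONDITION & SPEC =====
def Spec_EspaceInutile (phrase : String) (out : String) : Prop := out = EspaceInutile_alt phrase
instance (phrase : String) (out : String) : Decidable (Spec_EspaceInutile phrase out) := by unfold Spec_EspaceInutile; infer_instance

-- ===== CLAIM (what is proved, stated in full; the proofs are below) =====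
def Claim_equal_EspaceInutile : Prop := ∀ (phrase : String), Dom_EspaceInutile phrase → Spec_EspaceInutile phrase (EspaceInutile phrase)

-- ===== LEMMAS AND PROOFS =====

-- collapse of space runs, keeping the last space of each run (A's shape)
def pvCol : List Char → List Char
  | [] => []
  | [c] => [c]
  | c1 :: c2 :: r => if c1 = ' ' ∧ c2 = ' ' then pvCol (c2 :: r) else c1 :: pvCol (c2 :: r)

-- collapse keeping the first space of each run (B's shape)
def pvBrec : Bool → List Char → List Char
  | _, [] => []
  | prev, c :: r => if c = ' ' ∧ prev = true then pvBrec prev r else c :: pvBrec (decide (c = ' ')) r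

theorem pvCol_cons_ne (c : Char) (r : List Char) (hc : ¬ c = ' ') :
    pvCol (c :: r) = c :: pvCol r := by
  cases r with
  | nil => simp [pvCol]
  | cons c2 r2 => simp [pvCol, hc]

theorem pvBrec_eq_pvCol (l : List Char) :
    pvBrec false l = pvCol l ∧ ' ' :: pvBrec true l = pvCol (' ' :: l) := by
  induction l with
  | nil => constructor <;> simp [pvBrec, pvCol]
  | cons c r ih =>
    by_cases hc : c = ' '
    · subst hc
      constructor
      · simpa [pvBrec] using ih.2
      · show ' ' :: pvBrec true (' ' :: r) = pvCol (' ' :: ' ' :: r)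
        simp only [pvBrec, pvCol, if_pos (And.intro rfl rfl), if_pos rfl]
        simpa [pvBrec] using ih.2
    · constructor
      · simp [pvBrec, hc, pvCol_cons_ne c r hc, ih.1]
      · show ' ' :: pvBrec true (c :: r) = pvCol (' ' :: c :: r)
        simp [pvBrec, hc, pvCol, ih.1, pvCol_cons_ne c r hc]

theorem foldl_brec (l : List Char) : ∀ (acc : List Char) (prev : Bool),
    (l.foldl
      (fun (st : List Char × Bool) c =>
        if c = ' ' ∧ st.2 = true then st
        else (st.1 ++ [c], decide (c = ' ')))
      (acc, prev)).1 = acc ++ pvBrec prev l := by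
  induction l with
  | nil => intro acc prev; simp [pvBrec]
  | cons c r ih =>
    intro acc prev
    by_cases h : c = ' ' ∧ prev = true
    · simp only [List.foldl_cons, if_pos h, pvBrec, ih]
    · simp only [List.foldl_cons, if_neg h, pvBrec, ih, List.append_assoc,
        List.singleton_append]

theorem goA_eq (cs : List Char) : ∀ (n i : Nat) (p : List Char) (x : Nat),
    cs.length - i ≤ n → (i ≠ 0 ∨ ¬ cs.getD i ' ' = ' ') →
    EspaceInutileGo cs cs.length i p x = p ++ pvCol (cs.drop i) := by
  intro n
  induction n with
  | zero =>
    intro i p x hn hi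
    have hout : ¬ i < cs.length := by omega
    rw [EspaceInutileGo, dif_neg hout, List.drop_of_length_le (by omega)]
    simp [pvCol]
  | succ n ih =>
    intro i p x hn hi
    by_cases hlt : i < cs.length
    · have hdrop : cs.drop i = cs[i] :: cs.drop (i + 1) :=
        List.drop_eq_getElem_cons hlt
      have hgetD : cs.getD i ' ' = cs[i] := List.getD_eq_getElem cs ' ' hlt
      have hb1 : ¬ (i = 0 ∧ cs.getD i ' ' = ' ') := by
        rcases hi with h | h
        · exact fun hc => h hc.1
        · exact fun hc => h hc.2
      rw [EspaceInutileGo, dif_pos hlt, if_neg hb1]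
      by_cases hlast : i + 1 = cs.length
      · rw [if_pos hlast]
        have hout : ¬ i + 1 < cs.length := by omega
        rw [EspaceInutileGo, dif_neg hout]
        rw [hgetD, hdrop, List.drop_of_length_le (by omega)]
        simp [pvCol]
      · rw [if_neg hlast]
        have hlt2 : i + 1 < cs.length := by omega
        have hdrop2 : cs.drop (i + 1) = cs[i + 1] :: cs.drop (i + 2) :=
          List.drop_eq_getElem_cons hlt2
        have hgetD2 : cs.getD (i + 1) ' ' = cs[i + 1] := List.getD_eq_getElem cs ' ' hlt2
        have hrec : ∀ (p' : List Char) (x' : Nat),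
            EspaceInutileGo cs cs.length (i + 1) p' x' = p' ++ pvCol (cs.drop (i + 1)) := by
          intro p' x'
          exact ih (i + 1) p' x' (by omega) (Or.inl (by omega))
        by_cases hsp : cs.getD i ' ' = ' ' ∧ cs.getD (i + 1) ' ' = ' '
        · rw [if_pos hsp, hrec, hdrop, hdrop2]
          have hcol : pvCol (cs[i] :: cs[i + 1] :: cs.drop (i + 2)) =
              pvCol (cs[i + 1] :: cs.drop (i + 2)) := by
            rw [pvCol, if_pos ⟨by rw [← hgetD]; exact hsp.1, by rw [← hgetD2]; exact hsp.2⟩]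
          rw [hcol]
        · rw [if_neg hsp, hrec, hgetD, hdrop, hdrop2]
          have hcol : pvCol (cs[i] :: cs[i + 1] :: cs.drop (i + 2)) =
              cs[i] :: pvCol (cs[i + 1] :: cs.drop (i + 2)) := by
            rw [pvCol, if_neg (by rw [← hgetD, ← hgetD2]; exact hsp)]
          rw [hcol]
          simp
    · rw [EspaceInutileGo, dif_neg hlt, List.drop_of_length_le (by omega)]
      simp [pvCol]

theorem A_eq_col (cs : List Char) :
    EspaceInutileGo cs cs.length 0 [] 0 =
      pvCol (if cs.head? = some ' ' then cs.tail else cs) := by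
  cases cs with
  | nil => simp [EspaceInutileGo, pvCol]
  | cons c r =>
    by_cases hc : c = ' '
    · subst hc
      rw [EspaceInutileGo, dif_pos (by simp), if_pos (by simp)]
      have := goA_eq (' ' :: r) r.length 1 [] 0 (by simp) (Or.inl (by omega))
      simpa using this
    · have hh : ¬ ((' ' :: r).head? = some c) := by simp [eq_comm, hc]
      have := goA_eq (c :: r) (r.length + 1) 0 [] 0 (by simp) (Or.inr (by simpa using hc))
      rw [this]
      simp [hc]

-- ===== VERDICT (by name: the statement is the Claim_ definition above) =====
theorem EspaceInutile_spec : Claim_equal_EspaceInutile := by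
  intro phrase _
  show String.mk (EspaceInutileGo phrase.toList phrase.toList.length 0 [] 0) =
    String.mk (((if phrase.toList.head? = some ' ' then phrase.toList.tail
        else phrase.toList).foldl
      (fun (st : List Char × Bool) c =>
        if c = ' ' ∧ st.2 = true then st
        else (st.1 ++ [c], decide (c = ' ')))
      ([], false)).1)
  rw [A_eq_col, foldl_brec]
  simp [(pvBrec_eq_pvCol _).1]
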